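-- pv_equiv track=rewrite | github.com/minaek/tetris | tetromino.py | calculateBlockades
-- ===== SOURCE A (Python) =====
-- BOARDWIDTH = 10
--
-- def calculateBlockades(board):
--     totalBlockades = 0
--     for x in range(BOARDWIDTH):
--         column = board[x]
--         temp = 0
--         firstblock = False
--         emptyblock = False
--         for y in range(len(column)):
--             if(column[y] != '.'):
--                 firstblock = True
--             if(firstblock and column[y] == '.'):
--                 temp+=1
--                 emptyblock = True
--             if(firstblock and emptyblock and column[y] == '.'):
--                 emptyblock = True
--             if(firstblock and emptyblock and column[y] != '.'):
--                 temp+=1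
--                 emptyblock = False
--         totalBlockades += temp
--     return totalBlockades
-- ===== SOURCE B (Python) =====
-- BOARDWIDTH = 10
--
-- def calculateBlockades(board):
--     total = 0
--     for x in range(BOARDWIDTH):
--         column = board[x]
--         blocked = [c != '.' for c in column]
--         if True not in blocked:
--             continue
--         tail = column[blocked.index(True) + 1:]
--         total += tail.count('.')
--         total += sum(1 for a, b in zip(tail, tail[1:]) if a == '.' and b != '.')
--     return total
-- ===== Notes on version B (the rewrite author's own statement) =====
-- stated objective: simpler
-- what changed: Replaces the per-cell three-flag state machine with a direct decomposition: per column, find the first non-'.' cell, then over the suffix count '.' cells plus adjacent ('.', non-'.') pairs.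
import Mathlib
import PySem

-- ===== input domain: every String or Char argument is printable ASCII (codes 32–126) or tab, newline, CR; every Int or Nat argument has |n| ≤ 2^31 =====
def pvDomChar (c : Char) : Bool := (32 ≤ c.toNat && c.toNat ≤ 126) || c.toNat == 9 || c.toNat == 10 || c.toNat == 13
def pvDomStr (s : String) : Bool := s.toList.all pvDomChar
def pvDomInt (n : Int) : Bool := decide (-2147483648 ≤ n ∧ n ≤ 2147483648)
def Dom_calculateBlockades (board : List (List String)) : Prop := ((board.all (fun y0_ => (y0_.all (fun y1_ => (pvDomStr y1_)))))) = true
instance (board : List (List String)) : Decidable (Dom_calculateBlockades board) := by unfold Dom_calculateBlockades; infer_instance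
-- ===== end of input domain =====

-- B replaces A's three-flag per-cell state machine by a per-column decomposition
-- (first block index, then dots + closed dot-runs over the suffix); same return value.

-- ===== PORT A =====
-- one iteration of A's inner loop body (the three flags, branches in source order)
def pvStepA (st : Int × Bool × Bool) (c : String) : Int × Bool × Bool :=
  let temp := st.1
  let firstblock := st.2.1
  let emptyblock := st.2.2
  let firstblock := if c ≠ "." then true else firstblock
  let te := if firstblock ∧ c = "." then (temp + 1, true) else (temp, emptyblock)
  let temp := te.1
  let emptyblock := te.2
  let emptyblock := if firstblock ∧ emptyblock ∧ c = "." then true else emptyblock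
  let te2 := if firstblock ∧ emptyblock ∧ c ≠ "." then (temp + 1, false) else (temp, emptyblock)
  (te2.1, firstblock, te2.2)

def calculateBlockades (board : List (List String)) : Int :=
  (PySem.List.pyRange 0 10 1).foldl (fun totalBlockades x =>
    match PySem.List.pyGet? board x with
    | none => totalBlockades   -- unreachable under Pre_ (Python raises IndexError)
    | some column =>
      let st := (PySem.List.pyRange 0 (PySem.List.len column) 1).foldl
        (fun st y => pvStepA st (PySem.List.pyGetD column y "")) (0, false, false)
      totalBlockades + st.1) 0

-- ===== PORT B =====
def calculateBlockades_alt (board : List (List String)) : Int :=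
  (PySem.List.pyRange 0 10 1).foldl (fun total x =>
    match PySem.List.pyGet? board x with
    | none => total   -- unreachable under Pre_ (Python raises IndexError)
    | some column =>
      let blocked := column.map (fun c => decide (c ≠ "."))
      match PySem.List.index? blocked true with
      | none => total
      | some i =>
        let tail := PySem.List.slice column (some ((i : Int) + 1)) none
        total + (PySem.List.count tail "." : Int)
          + (tail.zip (PySem.List.slice tail (some 1) none)).foldl
              (fun s p => if p.1 = "." ∧ p.2 ≠ "." then s + 1 else s) 0) 0

-- ===== PRECONDITION & SPEC =====
-- Pre_: Python A indexes board[0..9], so it raises IndexError unless the board has at least 10 columns.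
def Pre_calculateBlockades (board : List (List String)) : Prop := 10 ≤ board.length
instance (board : List (List String)) : Decidable (Pre_calculateBlockades board) := by unfold Pre_calculateBlockades; infer_instance
def pvWitness_calculateBlockades : List (List String) :=
  [["X", "."], ["."], [], ["X"], [".", "X", "."], ["X", ".", "X"], ["."], ["."], ["."], ["X", ".", ".", "X"]]

def Spec_calculateBlockades (board : List (List String)) (out : Int) : Prop := out = calculateBlockades_alt board
instance (board : List (List String)) (out : Int) : Decidable (Spec_calculateBlockades board out) := by unfold Spec_calculateBlockades; infer_instance

-- ===== CLAIM (what is proved, stated in full; the proofs are below) =====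
def Claim_equal_calculateBlockades : Prop := ∀ (board : List (List String)), Dom_calculateBlockades board → Pre_calculateBlockades board → Spec_calculateBlockades board (calculateBlockades board)

-- ===== LEMMAS AND PROOFS =====

-- value of A's inner loop once firstblock is set: dots count +1 each, a non-dot closes a pending dot-run
def pvG : List String → Bool → Int
  | [], _ => 0
  | c :: r, eb => if c = "." then 1 + pvG r true else (if eb then 1 else 0) + pvG r false

theorem pvStepA_dot (t : Int) (fb eb : Bool) (c : String) (h : c = ".") :
    pvStepA (t, fb, eb) c = if fb then (t + 1, fb, true) else (t, fb, eb) := by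
  subst h; cases fb <;> cases eb <;> simp [pvStepA]

theorem pvStepA_nondot (t : Int) (fb eb : Bool) (c : String) (h : c ≠ ".") :
    pvStepA (t, fb, eb) c = if eb then (t + 1, true, false) else (t, true, false) := by
  cases eb <;> simp [pvStepA, h]

theorem foldl_stepA_true (tail : List String) : ∀ (t : Int) (eb : Bool),
    (tail.foldl pvStepA (t, true, eb)).1 = t + pvG tail eb := by
  induction tail with
  | nil => intro t eb; simp [pvG]
  | cons c r ih =>
    intro t eb
    by_cases h : c = "."
    · simp only [List.foldl_cons, pvStepA_dot t true eb c h, if_pos trivial, ih, pvG, if_pos h]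
      ring
    · simp only [List.foldl_cons, pvStepA_nondot t true eb c h, pvG, if_neg h]
      cases eb <;> simp [ih] <;> ring

-- A's whole inner loop: skip the leading dots, then pvG on the rest with no pending run
def pvHA : List String → Int
  | [] => 0
  | c :: r => if c = "." then pvHA r else pvG r false

theorem foldl_stepA_start (column : List String) :
    (column.foldl pvStepA (0, false, false)).1 = pvHA column := by
  induction column with
  | nil => simp [pvHA]
  | cons c r ih =>
    by_cases h : c = "."
    · rw [List.foldl_cons, pvStepA_dot 0 false false c h]
      simpa [pvHA, h] using ih
    · rw [List.foldl_cons, pvStepA_nondot 0 false false c h]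
      simp only [pvHA, if_neg h]
      simpa using foldl_stepA_true r 0 false

-- B's per-suffix count: dots plus adjacent (dot, non-dot) pairs
def pvB (tail : List String) : Int :=
  (PySem.List.count tail "." : Int)
    + ((tail.zip (PySem.List.slice tail (some 1) none)).foldl
        (fun s p => if p.1 = "." ∧ p.2 ≠ "." then s + 1 else s) 0)

def pvAdj : List String → Int
  | [] => 0
  | [_] => 0
  | a :: b :: r => (if a = "." ∧ b ≠ "." then 1 else 0) + pvAdj (b :: r)

theorem zipfold_eq_pvAdj (tail : List String) : ∀ (s : Int),
    (tail.zip tail.tail).foldl (fun s p => if p.1 = "." ∧ p.2 ≠ "." then s + 1 else s) s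
      = s + pvAdj tail := by
  induction tail with
  | nil => intro s; simp [pvAdj]
  | cons a r ih =>
    intro s
    cases r with
    | nil => simp [pvAdj]
    | cons b r' =>
      simp only [List.tail_cons, List.zip_cons_cons, List.foldl_cons]
      simp only [List.tail_cons] at ih
      by_cases h : a = "." ∧ b ≠ "."
      · rw [if_pos h, ih (s + 1)]; simp [pvAdj, if_pos h]; ring
      · rw [if_neg h, ih s]; simp [pvAdj, if_neg h]

theorem pvB_eq (tail : List String) :
    pvB tail = (tail.count "." : Int) + pvAdj tail := by
  simp only [pvB, PySem.List.count, PySem.List.slice_from_one]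
  rw [zipfold_eq_pvAdj tail 0]
  ring

-- the pending-run helper in terms of B's counts
theorem pvG_eq (tail : List String) : ∀ eb : Bool,
    pvG tail eb = (tail.count "." : Int) + pvAdj tail
      + (match tail with | [] => 0 | c :: _ => if eb ∧ c ≠ "." then (1 : Int) else 0) := by
  induction tail with
  | nil => intro eb; simp [pvG, pvAdj]
  | cons c r ih =>
    intro eb
    by_cases h : c = "."
    · simp only [pvG, ih true, List.count_cons, h]
      cases r with
      | nil => simp [pvAdj]
      | cons b r' =>
        by_cases hb : b = "." <;> simp [pvAdj, hb] <;> push_cast <;> ring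
    · simp only [pvG, if_neg h, ih false, List.count_cons]
      cases r with
      | nil => simp [pvAdj, h]
      | cons b r' => simp [pvAdj, h]; cases eb <;> simp <;> ring

-- B's per-column value as written in the port
def pvColB (column : List String) : Int :=
  match PySem.List.index? (column.map (fun c => decide (c ≠ "."))) true with
  | none => 0
  | some i => pvB (PySem.List.slice column (some ((i : Int) + 1)) none)

theorem pvHA_eq_pvColB (column : List String) : pvHA column = pvColB column := by
  induction column with
  | nil => simp [pvHA, pvColB, PySem.List.index?]
  | cons c r ih =>
    by_cases h : c = "."
    · have hb : decide (c ≠ ".") = false := by simp [h]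
      simp only [pvHA, if_pos h, pvColB, List.map_cons, hb]
      rw [PySem.List.index?_cons_of_ne _ (by simp)]
      simp only [pvColB] at ih
      cases hi : PySem.List.index? (r.map (fun c => decide (c ≠ "."))) true with
      | none => rw [hi] at ih; simpa using ih
      | some i =>
        rw [hi] at ih
        simp only [Option.map_some]
        rw [ih]
        show pvB (PySem.List.slice r (some ((i : Int) + 1)) none)
          = pvB (PySem.List.slice (c :: r) (some (((i + 1 : Nat) : Int) + 1)) none)
        rw [show ((i : Int) + 1) = (((i + 1 : Nat) : Int)) by push_cast; ring,
            show (((i + 1 : Nat) : Int) + 1) = (((i + 2 : Nat) : Int)) by push_cast; ring,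
            PySem.List.slice_from_natCast, PySem.List.slice_from_natCast]
        simp
    · have hb : decide (c ≠ ".") = true := by simp [h]
      simp only [pvHA, if_neg h, pvColB, List.map_cons, hb]
      rw [PySem.List.index?_cons_self]
      simp only [Nat.cast_zero, zero_add, PySem.List.slice_from_one, List.tail_cons]
      rw [pvB_eq, pvG_eq r false]
      cases r <;> simp

-- ===== VERDICT (by name: the statement is the Claim_ definition above) =====
theorem calculateBlockades_spec : Claim_equal_calculateBlockades := by
  intro board _ _
  unfold Spec_calculateBlockades calculateBlockades calculateBlockades_alt
  have hf : (fun (totalBlockades : Int) (x : Int) =>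
      match PySem.List.pyGet? board x with
      | none => totalBlockades
      | some column =>
        let st := (PySem.List.pyRange 0 (PySem.List.len column) 1).foldl
          (fun st y => pvStepA st (PySem.List.pyGetD column y "")) (0, false, false)
        totalBlockades + st.1)
      = (fun (total : Int) (x : Int) =>
      match PySem.List.pyGet? board x with
      | none => total
      | some column =>
        let blocked := column.map (fun c => decide (c ≠ "."))
        match PySem.List.index? blocked true with
        | none => total
        | some i =>
          let tail := PySem.List.slice column (some ((i : Int) + 1)) none
          total + (PySem.List.count tail "." : Int)
            + (tail.zip (PySem.List.slice tail (some 1) none)).foldl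
                (fun s p => if p.1 = "." ∧ p.2 ≠ "." then s + 1 else s) 0) := by
    funext total x
    cases hg : PySem.List.pyGet? board x with
    | none => simp
    | some column =>
      simp only []
      rw [PySem.List.foldl_pyRange_zero_pyGetD column "" pvStepA (0, false, false),
          foldl_stepA_start, pvHA_eq_pvColB]
      simp only [pvColB, pvB]
      cases hi : PySem.List.index? (column.map (fun c => decide (c ≠ "."))) true with
      | none => simp
      | some i => simp; ring
  rw [hf]
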